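-- pv_equiv track=rewrite | github.com/malo-gv/pychatbot-Gavard-Millereux-BDX-TP | functions_q_and_a.py | tokeniser_question
-- ===== SOURCE A (Python) =====
-- import string
--
-- def tokeniser_question(question):
--     contenu_sans_ponctuation = ''.join(
--         caractere if caractere not in string.punctuation else ' ' for caractere in question)
--     contenu_traite = []
--     mots = contenu_sans_ponctuation.split()
--     for mot in mots:
--         if '-' in mot:
--             sous_mots = mot.split('-')
--             contenu_traite.extend(sous_mots)
--         elif "'" in mot:
--             sous_mots = mot.split("'")
--             contenu_traite.extend(sous_mots)
--         else:
--             contenu_traite.append(mot)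
--     contenu_final = ' '.join(contenu_traite)
--     mots = contenu_final.split()
--     liste_mots = list(mots)
--     return liste_mots
-- ===== SOURCE B (Python) =====
-- import string
--
-- def tokeniser_question(question):
--     tokens = []
--     current = []
--     for caractere in question:
--         if caractere in string.punctuation or caractere.isspace():
--             if current:
--                 tokens.append(''.join(current))
--                 current = []
--         else:
--             current.append(caractere)
--     if current:
--         tokens.append(''.join(current))
--     return tokens
-- ===== Notes on version B (the rewrite author's own statement) =====
-- stated objective: simpler
-- what changed: B tokenizes in a single scan of the original string, collecting maximal runs of non-punctuation non-whitespace characters, instead of A's pipeline of building a punctuation-cleaned string, splitting it, running the (dead) hyphen/apostrophe re-splitting loop, re-joining with spaces and splitting again.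
import Mathlib
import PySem

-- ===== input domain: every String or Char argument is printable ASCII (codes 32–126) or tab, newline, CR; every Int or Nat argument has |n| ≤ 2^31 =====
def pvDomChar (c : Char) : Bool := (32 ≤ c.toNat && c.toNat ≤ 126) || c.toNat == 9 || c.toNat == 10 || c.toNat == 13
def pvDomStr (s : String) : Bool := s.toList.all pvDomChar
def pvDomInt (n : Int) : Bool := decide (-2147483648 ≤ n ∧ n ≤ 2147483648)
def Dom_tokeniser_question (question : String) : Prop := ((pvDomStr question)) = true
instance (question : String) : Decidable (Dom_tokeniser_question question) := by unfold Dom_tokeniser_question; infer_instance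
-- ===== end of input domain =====

-- B replaces A's clean-join-split-loop-join-split pipeline by one direct scan of the
-- original string that collects maximal runs of non-punctuation non-whitespace characters
-- (simpler: one pass, no intermediate strings; A's hyphen/apostrophe branches are dead).

-- string.punctuation (shared constant)
def pvPunct (c : Char) : Bool := "!\"#$%&'()*+,-./:;<=>?@[\\]^_`{|}~".toList.contains c

-- ===== PORT A =====
def tokeniser_question (question : String) : List String :=
  let contenu_sans_ponctuation : List Char :=
    question.toList.map (fun caractere => if pvPunct caractere then ' ' else caractere)
  let mots := PySem.Chars.split₀ contenu_sans_ponctuation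
  let contenu_traite := mots.foldl (fun acc mot =>
      if PySem.Chars.isIn ['-'] mot then acc ++ PySem.Chars.splitOn mot ['-']
      else if PySem.Chars.isIn ['\''] mot then acc ++ PySem.Chars.splitOn mot ['\'']
      else acc ++ [mot]) []
  let contenu_final := PySem.Chars.join [' '] contenu_traite
  (PySem.Chars.split₀ contenu_final).map String.mk

-- ===== PORT B =====
def pvAltStep (st : List String × List Char) (c : Char) : List String × List Char :=
  if pvPunct c || PySem.Chars.isspace c then
    if st.2.isEmpty then (st.1, []) else (st.1 ++ [String.mk st.2], [])
  else (st.1, st.2 ++ [c])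

def tokeniser_question_alt (question : String) : List String :=
  let st := question.toList.foldl pvAltStep ([], [])
  if st.2.isEmpty then st.1 else st.1 ++ [String.mk st.2]

-- ===== PRECONDITION & SPEC =====
def Spec_tokeniser_question (question : String) (out : List String) : Prop := out = tokeniser_question_alt question
instance (question : String) (out : List String) : Decidable (Spec_tokeniser_question question out) := by unfold Spec_tokeniser_question; infer_instance

-- ===== CLAIM (what is proved, stated in full; the proofs are below) =====
def Claim_equal_tokeniser_question : Prop := ∀ (question : String), Dom_tokeniser_question question → Spec_tokeniser_question question (tokeniser_question question)

-- ===== LEMMAS AND PROOFS =====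

-- the character cleaning of A
def pvClean (c : Char) : Char := if pvPunct c then ' ' else c

lemma pvClean_ne_dash (c : Char) : pvClean c ≠ '-' := by
  unfold pvClean
  by_cases h : pvPunct c = true
  · simp [h]
  · simp [h]
    intro hc; subst hc; exact h (by decide)

lemma pvClean_ne_apos (c : Char) : pvClean c ≠ '\'' := by
  unfold pvClean
  by_cases h : pvPunct c = true
  · simp [h]
  · simp [h]
    intro hc; subst hc; exact h (by decide)

lemma pvIsspace_clean (c : Char) :
    PySem.Chars.isspace (pvClean c) = (pvPunct c || PySem.Chars.isspace c) := by
  unfold pvClean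
  by_cases h : pvPunct c = true
  · simp [h]; decide
  · simp [h]

-- every char of every token produced by split₀.go comes from acc, cur or the input
lemma pv_go_chars : ∀ (s cur : List Char) (acc : List (List Char)) (mot : List Char),
    mot ∈ PySem.Chars.split₀.go s cur acc →
    mot ∈ acc ∨ (∀ x ∈ mot, x ∈ cur ∨ x ∈ s) := by
  intro s
  induction s with
  | nil =>
    intro cur acc mot h
    by_cases hc : cur.isEmpty
    · simp [PySem.Chars.split₀.go, hc] at h; exact Or.inl h
    · simp [PySem.Chars.split₀.go, hc] at h
      rcases h with h | h
      · exact Or.inl h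
      · right; intro x hx; left; rw [h] at hx; simpa using hx
  | cons c rest ih =>
    intro cur acc mot h
    by_cases hs : PySem.Chars.isspace c = true
    · by_cases hc : cur.isEmpty
      · simp only [PySem.Chars.split₀.go, hs, hc] at h
        rcases ih [] acc mot (by simpa [hs, hc] using h) with h' | h'
        · exact Or.inl h'
        · right; intro x hx
          rcases h' x hx with h'' | h''
          · simp at h''
          · exact Or.inr (List.mem_cons_of_mem _ h'')
      · rcases ih [] (cur.reverse :: acc) mot (by simpa [PySem.Chars.split₀.go, hs, hc] using h) with h' | h'
        · rcases List.mem_cons.mp h' with h'' | h''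
          · right; intro x hx; left; rw [h''] at hx; simpa using hx
          · exact Or.inl h''
        · right; intro x hx
          rcases h' x hx with h'' | h''
          · simp at h''
          · exact Or.inr (List.mem_cons_of_mem _ h'')
    · rcases ih (c :: cur) acc mot (by simpa [PySem.Chars.split₀.go, hs] using h) with h' | h'
      · exact Or.inl h'
      · right; intro x hx
        rcases h' x hx with h'' | h''
        · rcases List.mem_cons.mp h'' with h3 | h3
          · exact Or.inr (h3 ▸ List.mem_cons_self)
          · exact Or.inl h3
        · exact Or.inr (List.mem_cons_of_mem _ h'')

lemma pv_split₀_chars (s : List Char) (mot : List Char) (h : mot ∈ PySem.Chars.split₀ s) :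
    ∀ x ∈ mot, x ∈ s := by
  rcases pv_go_chars s [] [] mot h with h' | h'
  · simp at h'
  · intro x hx; rcases h' x hx with h'' | h''
    · simp at h''
    · exact h''

-- tokens of split₀ are nonempty
lemma pv_go_ne_nil : ∀ (s cur : List Char) (acc : List (List Char)),
    (∀ m ∈ acc, m ≠ []) → ∀ m ∈ PySem.Chars.split₀.go s cur acc, m ≠ [] := by
  intro s
  induction s with
  | nil =>
    intro cur acc hacc m hm
    by_cases hc : cur.isEmpty
    · simp [PySem.Chars.split₀.go, hc] at hm; exact hacc m hm
    · simp [PySem.Chars.split₀.go, hc] at hm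
      rcases hm with hm | hm
      · exact hacc m hm
      · subst hm; simpa [List.isEmpty_iff] using hc
  | cons c rest ih =>
    intro cur acc hacc m hm
    by_cases hs : PySem.Chars.isspace c = true
    · by_cases hc : cur.isEmpty
      · exact ih [] acc hacc m (by simpa [PySem.Chars.split₀.go, hs, hc] using hm)
      · refine ih [] (cur.reverse :: acc) ?_ m (by simpa [PySem.Chars.split₀.go, hs, hc] using hm)
        intro m' hm'
        rcases List.mem_cons.mp hm' with h' | h'
        · subst h'; simpa [List.isEmpty_iff] using hc
        · exact hacc m' h'
    · exact ih (c :: cur) acc hacc m (by simpa [PySem.Chars.split₀.go, hs] using hm)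

-- tokens of split₀ contain no whitespace
lemma pv_go_no_space : ∀ (s cur : List Char) (acc : List (List Char)),
    (∀ m ∈ acc, ∀ x ∈ m, PySem.Chars.isspace x = false) →
    (∀ x ∈ cur, PySem.Chars.isspace x = false) →
    ∀ m ∈ PySem.Chars.split₀.go s cur acc, ∀ x ∈ m, PySem.Chars.isspace x = false := by
  intro s
  induction s with
  | nil =>
    intro cur acc hacc hcur m hm
    by_cases hc : cur.isEmpty
    · simp [PySem.Chars.split₀.go, hc] at hm; exact hacc m hm
    · simp [PySem.Chars.split₀.go, hc] at hm
      rcases hm with hm | hm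
      · exact hacc m hm
      · subst hm; intro x hx; exact hcur x (by simpa using hx)
  | cons c rest ih =>
    intro cur acc hacc hcur m hm
    by_cases hs : PySem.Chars.isspace c = true
    · by_cases hc : cur.isEmpty
      · exact ih [] acc hacc (by simp) m (by simpa [PySem.Chars.split₀.go, hs, hc] using hm)
      · refine ih [] (cur.reverse :: acc) ?_ (by simp) m (by simpa [PySem.Chars.split₀.go, hs, hc] using hm)
        intro m' hm'
        rcases List.mem_cons.mp hm' with h' | h'
        · subst h'; intro x hx; exact hcur x (by simpa using hx)
        · exact hacc m' h'
    · refine ih (c :: cur) acc hacc ?_ m (by simpa [PySem.Chars.split₀.go, hs] using hm)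
      intro x hx
      rcases List.mem_cons.mp hx with h' | h'
      · subst h'; simpa using hs
      · exact hcur x h'

-- running go through a spaceless block just accumulates it
lemma pv_go_block : ∀ (t : List Char), (∀ x ∈ t, PySem.Chars.isspace x = false) →
    ∀ (s cur : List Char) (acc : List (List Char)),
    PySem.Chars.split₀.go (t ++ s) cur acc = PySem.Chars.split₀.go s (t.reverse ++ cur) acc := by
  intro t
  induction t with
  | nil => intro _ s cur acc; simp
  | cons c t ih =>
    intro h s cur acc
    have hc : PySem.Chars.isspace c = false := h c List.mem_cons_self
    have : PySem.Chars.split₀.go (c :: (t ++ s)) cur acc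
        = PySem.Chars.split₀.go (t ++ s) (c :: cur) acc := by
      simp [PySem.Chars.split₀.go, hc]
    rw [List.cons_append, this, ih (fun x hx => h x (List.mem_cons_of_mem _ hx))]
    simp

-- split₀ of a space-joined list of nonempty spaceless parts gives the parts back
lemma pv_go_join : ∀ (parts : List (List Char)),
    (∀ m ∈ parts, m ≠ []) → (∀ m ∈ parts, ∀ x ∈ m, PySem.Chars.isspace x = false) →
    ∀ acc, PySem.Chars.split₀.go (PySem.Chars.join [' '] parts) [] acc = acc.reverse ++ parts := by
  intro parts
  induction parts with
  | nil => intro _ _ acc; simp [PySem.Chars.join, List.intercalate, PySem.Chars.split₀.go]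
  | cons p ps ih =>
    intro hne hsp acc
    have hp_ne : p ≠ [] := hne p List.mem_cons_self
    have hp_sp : ∀ x ∈ p, PySem.Chars.isspace x = false := hsp p List.mem_cons_self
    cases ps with
    | nil =>
      have : PySem.Chars.join [' '] [p] = p ++ [] := by
        simp [PySem.Chars.join, List.intercalate, List.intersperse]
      rw [this, pv_go_block p hp_sp]
      simp [PySem.Chars.split₀.go, List.isEmpty_iff, hp_ne]
    | cons q qs =>
      have hj : PySem.Chars.join [' '] (p :: q :: qs) = p ++ (' ' :: PySem.Chars.join [' '] (q :: qs)) := by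
        simp [PySem.Chars.join, List.intercalate, List.intersperse]
      rw [hj, pv_go_block p hp_sp]
      have hstep : PySem.Chars.split₀.go (' ' :: PySem.Chars.join [' '] (q :: qs)) (p.reverse ++ []) acc
          = PySem.Chars.split₀.go (PySem.Chars.join [' '] (q :: qs)) [] (p :: acc) := by
        have hsp' : PySem.Chars.isspace ' ' = true := by decide
        simp [PySem.Chars.split₀.go, hsp', List.isEmpty_iff, hp_ne]
      rw [hstep, ih (fun m hm => hne m (List.mem_cons_of_mem _ hm))
            (fun m hm => hsp m (List.mem_cons_of_mem _ hm)) (p :: acc)]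
      simp

-- the dead hyphen/apostrophe loop of A is the identity
lemma pv_fold_id : ∀ (mots : List (List Char)),
    (∀ m ∈ mots, ('-' ∉ m) ∧ ('\'' ∉ m)) →
    ∀ acc, mots.foldl (fun acc mot =>
      if PySem.Chars.isIn ['-'] mot then acc ++ PySem.Chars.splitOn mot ['-']
      else if PySem.Chars.isIn ['\''] mot then acc ++ PySem.Chars.splitOn mot ['\'']
      else acc ++ [mot]) acc = acc ++ mots := by
  intro mots
  induction mots with
  | nil => intro _ acc; simp
  | cons m ms ih =>
    intro h acc
    have hm := h m List.mem_cons_self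
    have h1 : PySem.Chars.isIn ['-'] m = false := by
      rw [PySem.Chars.isIn_eq_false_iff]
      intro hin
      exact hm.1 ((List.singleton_infix_iff _ _).mp hin)
    have h2 : PySem.Chars.isIn ['\''] m = false := by
      rw [PySem.Chars.isIn_eq_false_iff]
      intro hin
      exact hm.2 ((List.singleton_infix_iff _ _).mp hin)
    simp only [List.foldl_cons, h1, h2, Bool.false_eq_true, if_false]
    rw [ih (fun m' hm' => h m' (List.mem_cons_of_mem _ hm'))]
    simp

-- B's scan equals split₀ of the cleaned string
lemma pv_alt_go : ∀ (cs cur : List Char) (acc : List (List Char)),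
    (let st := cs.foldl pvAltStep (acc.reverse.map String.mk, cur);
     if st.2.isEmpty then st.1 else st.1 ++ [String.mk st.2])
    = (PySem.Chars.split₀.go (cs.map pvClean) cur.reverse acc).map String.mk := by
  intro cs
  induction cs with
  | nil =>
    intro cur acc
    by_cases hc : cur.isEmpty
    · simp_all [PySem.Chars.split₀.go, List.isEmpty_iff]
    · have hc' : cur.reverse.isEmpty = false := by
        simp_all [List.isEmpty_iff]
      simp [PySem.Chars.split₀.go, hc, hc']
  | cons c rest ih =>
    intro cur acc
    by_cases hd : (pvPunct c || PySem.Chars.isspace c) = true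
    · have hsc : PySem.Chars.isspace (pvClean c) = true := by rw [pvIsspace_clean]; exact hd
      by_cases hc : cur.isEmpty
      · have hcur : cur = [] := List.isEmpty_iff.mp hc
        subst hcur
        have hA : PySem.Chars.split₀.go (pvClean c :: rest.map pvClean) [] acc
            = PySem.Chars.split₀.go (rest.map pvClean) [] acc := by
          simp [PySem.Chars.split₀.go, hsc]
        simpa [pvAltStep, hd, hA] using ih [] acc
      · have hc' : cur.reverse.isEmpty = false := by simp_all [List.isEmpty_iff]
        have hA : PySem.Chars.split₀.go (pvClean c :: rest.map pvClean) cur.reverse acc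
            = PySem.Chars.split₀.go (rest.map pvClean) [] (cur :: acc) := by
          simp [PySem.Chars.split₀.go, hsc, hc']
        have hB := ih [] (cur :: acc)
        simp only [List.reverse_nil] at hB
        simp only [List.map_cons, hA]
        rw [← hB]
        simp [pvAltStep, hd, hc]
    · have hsc : PySem.Chars.isspace (pvClean c) = false := by rw [pvIsspace_clean]; simpa using hd
      have hcl : pvClean c = c := by
        unfold pvClean
        have : pvPunct c = false := by
          rcases Bool.or_eq_false_iff.mp (by simpa using hd) with ⟨h1, _⟩
          exact h1
        simp [this]
      have hsc' : PySem.Chars.isspace c = false := by rw [← hcl]; exact hsc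
      have hA : PySem.Chars.split₀.go (pvClean c :: rest.map pvClean) cur.reverse acc
          = PySem.Chars.split₀.go (rest.map pvClean) ((cur ++ [c]).reverse) acc := by
        simp [PySem.Chars.split₀.go, hcl, hsc']
      have hB := ih (cur ++ [c]) acc
      simp only [List.map_cons, hA]
      rw [← hB]
      simp [pvAltStep, hd]

lemma pv_alt_eq (question : String) :
    tokeniser_question_alt question
    = (PySem.Chars.split₀ (question.toList.map pvClean)).map String.mk := by
  have := pv_alt_go question.toList [] []
  simpa [tokeniser_question_alt, PySem.Chars.split₀] using this

-- ===== VERDICT (by name: the statement is the Claim_ definition above) =====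
theorem tokeniser_question_spec : Claim_equal_tokeniser_question := by
  intro question _
  unfold Spec_tokeniser_question tokeniser_question
  rw [pv_alt_eq]
  simp only []
  set cleaned := question.toList.map (fun c => if pvPunct c then ' ' else c) with hcleaned
  have hclean_eq : cleaned = question.toList.map pvClean := by
    simp [hcleaned, pvClean]
  set mots := PySem.Chars.split₀ cleaned with hmots
  have hchars : ∀ m ∈ mots, ∀ x ∈ m, x ∈ cleaned := fun m hm => pv_split₀_chars cleaned m hm
  have hdead : ∀ m ∈ mots, ('-' ∉ m) ∧ ('\'' ∉ m) := by
    intro m hm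
    constructor
    · intro hx
      rcases List.mem_map.mp (hclean_eq ▸ hchars m hm '-' hx) with ⟨c, _, hc⟩
      exact pvClean_ne_dash c hc
    · intro hx
      rcases List.mem_map.mp (hclean_eq ▸ hchars m hm '\'' hx) with ⟨c, _, hc⟩
      exact pvClean_ne_apos c hc
  have hfold := pv_fold_id mots hdead []
  rw [hfold]
  have hne : ∀ m ∈ mots, m ≠ [] := pv_go_ne_nil cleaned [] [] (by simp)
  have hsp : ∀ m ∈ mots, ∀ x ∈ m, PySem.Chars.isspace x = false :=
    pv_go_no_space cleaned [] [] (by simp) (by simp)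
  have hrt : PySem.Chars.split₀ (PySem.Chars.join [' '] mots) = mots := by
    have := pv_go_join mots hne hsp []
    simpa [PySem.Chars.split₀] using this
  rw [List.nil_append, hrt, hmots, hclean_eq]
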